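-- pv_equiv track=rewrite | github.com/KOUTOATI/30DaysOfPython | day_11/functions.py | even_and_odd_numbers
-- ===== SOURCE A (Python) =====
-- def even_and_odd_numbers(number):
--     even_numbers = []
--     odd_numbers = []
--     for i in range(number):
--         if i % 2 == 0:
--             even_numbers.append(i)
--         else:
--             odd_numbers.append(i)
--     return {"the number of evens are ": even_numbers, "the number of odds are ": odd_numbers}
-- ===== SOURCE B (Python) =====
-- def even_and_odd_numbers(number):
--     return {"the number of evens are ": list(range(0, number, 2)),
--             "the number of odds are ": list(range(1, number, 2))}
-- ===== Notes on version B (the rewrite author's own statement) =====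
-- stated objective: idiomatic
-- what changed: Replaces the single loop with a parity branch and two growing accumulators by two strided range() calls (step 2) that produce the even and odd lists directly.
import Mathlib
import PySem

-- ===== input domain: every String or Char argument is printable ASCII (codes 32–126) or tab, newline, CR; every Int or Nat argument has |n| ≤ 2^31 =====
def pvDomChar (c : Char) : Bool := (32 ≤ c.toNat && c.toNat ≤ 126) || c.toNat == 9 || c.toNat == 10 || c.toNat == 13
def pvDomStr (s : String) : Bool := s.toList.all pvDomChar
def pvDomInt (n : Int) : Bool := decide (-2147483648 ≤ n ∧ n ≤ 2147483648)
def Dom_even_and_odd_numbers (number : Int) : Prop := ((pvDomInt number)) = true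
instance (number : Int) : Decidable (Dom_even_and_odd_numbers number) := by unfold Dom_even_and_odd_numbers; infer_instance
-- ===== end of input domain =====

-- B replaces A's single parity-branching loop by two strided ranges (idiomatic; same asymptotic cost).

-- ===== PORT A =====
-- literal port: one pass over range(number), appending to evens or odds by parity
def even_and_odd_numbers (number : Int) : List (String × List Int) :=
  let p := (PySem.List.pyRange 0 number 1).foldl
    (fun (acc : List Int × List Int) i =>
      if PySem.Int.mod i 2 = 0 then (acc.1 ++ [i], acc.2) else (acc.1, acc.2 ++ [i]))
    ([], [])
  [("the number of evens are ", p.1), ("the number of odds are ", p.2)]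

-- ===== PORT B =====
-- literal port of Source B: two strided ranges, no loop of our own
def even_and_odd_numbers_alt (number : Int) : List (String × List Int) :=
  [("the number of evens are ", PySem.List.pyRange 0 number 2),
   ("the number of odds are ", PySem.List.pyRange 1 number 2)]

-- ===== PRECONDITION & SPEC =====
def Spec_even_and_odd_numbers (number : Int) (out : List (String × List Int)) : Prop := out = even_and_odd_numbers_alt number
instance (number : Int) (out : List (String × List Int)) : Decidable (Spec_even_and_odd_numbers number out) := by unfold Spec_even_and_odd_numbers; infer_instance

-- ===== CLAIM (what is proved, stated in full; the proofs are below) =====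
def Claim_equal_even_and_odd_numbers : Prop := ∀ (number : Int), Dom_even_and_odd_numbers number → Spec_even_and_odd_numbers number (even_and_odd_numbers number)

-- ===== LEMMAS AND PROOFS =====

-- closed form of the strided even range
theorem pyRange_even_closed (n : Nat) :
    PySem.List.pyRange 0 (n : Int) 2 = (List.range ((n + 1) / 2)).map (fun k : Nat => 2 * (k : Int)) := by
  rw [PySem.List.pyRange_of_pos 0 (n : Int) (by norm_num)]
  rcases Nat.eq_zero_or_pos n with h | h
  · subst h; simp
  · have hlt : (0 : Int) < (n : Int) := by exact_mod_cast h
    rw [if_pos hlt]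
    have : ((n : Int) - 0 + 2 - 1) / 2 = (((n + 1) / 2 : Nat) : Int) := by
      push_cast
      omega
    rw [this, Int.toNat_natCast]
    simp

-- closed form of the strided odd range
theorem pyRange_odd_closed (n : Nat) :
    PySem.List.pyRange 1 (n : Int) 2 = (List.range (n / 2)).map (fun k : Nat => 1 + 2 * (k : Int)) := by
  rw [PySem.List.pyRange_of_pos 1 (n : Int) (by norm_num)]
  rcases Nat.lt_or_ge 1 n with h | h
  · have hlt : (1 : Int) < (n : Int) := by exact_mod_cast h
    rw [if_pos hlt]
    have : ((n : Int) - 1 + 2 - 1) / 2 = (((n / 2 : Nat)) : Int) := by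
      push_cast
      omega
    rw [this, Int.toNat_natCast]
  · have hn2 : n / 2 = 0 := by omega
    have hle : ¬ ((1 : Int) < (n : Int)) := by exact_mod_cast Nat.not_lt.mpr h
    rw [if_neg hle, hn2]

-- A's loop computes exactly those two closed forms
theorem loop_closed (n : Nat) :
    (PySem.List.pyRange 0 (n : Int) 1).foldl
      (fun (acc : List Int × List Int) i =>
        if PySem.Int.mod i 2 = 0 then (acc.1 ++ [i], acc.2) else (acc.1, acc.2 ++ [i]))
      ([], []) =
    ((List.range ((n + 1) / 2)).map (fun k : Nat => 2 * (k : Int)),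
     (List.range (n / 2)).map (fun k : Nat => 1 + 2 * (k : Int))) := by
  induction n with
  | zero => simp [PySem.List.pyRange_one_eq_nil]
  | succ n ih =>
    have hsplit : PySem.List.pyRange 0 ((n : Int) + 1) 1 =
        PySem.List.pyRange 0 (n : Int) 1 ++ [(n : Int)] := by
      exact PySem.List.pyRange_one_succ_right (by exact_mod_cast Nat.zero_le n)
    have hcast : ((n + 1 : Nat) : Int) = (n : Int) + 1 := by push_cast; ring
    rw [hcast, hsplit, List.foldl_append, ih]
    rcases Nat.even_or_odd n with ⟨m, hm⟩ | ⟨m, hm⟩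
    · -- n = 2m even: appended to evens
      subst hm
      have hmod : PySem.Int.mod ((m + m : Nat) : Int) 2 = 0 := by
        simp [PySem.Int.mod, Int.fmod_eq_emod]; omega
      simp only [List.foldl_cons, List.foldl_nil]
      rw [if_pos hmod]
      simp only [Prod.mk.injEq]
      refine ⟨?_, ?_⟩
      · have h1 : (m + m + 1 + 1) / 2 = m + 1 := by omega
        have h2 : (m + m + 1) / 2 = m := by omega
        rw [h1, h2, List.range_succ, List.map_append]
        simp
        ring
      · have h1 : (m + m + 1) / 2 = m := by omega
        have h2 : (m + m) / 2 = m := by omega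
        rw [h1, h2]
    · -- n = 2m+1 odd: appended to odds
      subst hm
      have hmod : ¬ PySem.Int.mod ((2 * m + 1 : Nat) : Int) 2 = 0 := by
        simp [PySem.Int.mod, Int.fmod_eq_emod]
      simp only [List.foldl_cons, List.foldl_nil]
      rw [if_neg hmod]
      simp only [Prod.mk.injEq]
      refine ⟨?_, ?_⟩
      · have h1 : (2 * m + 1 + 1 + 1) / 2 = m + 1 := by omega
        have h2 : (2 * m + 1 + 1) / 2 = m + 1 := by omega
        rw [h1, h2]
      · have h1 : (2 * m + 1 + 1) / 2 = m + 1 := by omega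
        have h2 : (2 * m + 1) / 2 = m := by omega
        rw [h1, h2, List.range_succ, List.map_append]
        simp
        ring

-- ===== VERDICT (by name: the statement is the Claim_ definition above) =====
theorem even_and_odd_numbers_spec : Claim_equal_even_and_odd_numbers := by
  intro number _
  unfold Spec_even_and_odd_numbers even_and_odd_numbers even_and_odd_numbers_alt
  by_cases h : number ≤ 0
  · have h0 : PySem.List.pyRange 0 number 1 = [] := PySem.List.pyRange_one_eq_nil h
    have h2 : PySem.List.pyRange 0 number 2 = [] := by
      rw [PySem.List.pyRange_of_pos 0 number (by norm_num), if_neg (by omega)]; simp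
    have h3 : PySem.List.pyRange 1 number 2 = [] := by
      rw [PySem.List.pyRange_of_pos 1 number (by norm_num), if_neg (by omega)]; simp
    simp [h0, h2, h3]
  · have h' : (0 : Int) ≤ number := by omega
    obtain ⟨n, rfl⟩ := Int.eq_ofNat_of_zero_le h'
    simp only [loop_closed, pyRange_even_closed, pyRange_odd_closed]
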